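-- pv_equiv track=rewrite | github.com/mishagreh/CodewarsKatasProject | 6kyu/block_letter_printer.py | block_print
-- ===== SOURCE A (Python) =====
-- def block_print(s: str) -> str:
--     """ returns a string with letters made by letters (i.e. so-called block letters) """
--
--     alpha = {'A': {0: ' AAA  ', 1: 'A   A ', 2: 'A   A ', 3: 'AAAAA ', 4: 'A   A ', 5: 'A   A ', 6: 'A   A '},
--              'B': {0: 'BBBB  ', 1: 'B   B ', 2: 'B   B ', 3: 'BBBB  ', 4: 'B   B ', 5: 'B   B ', 6: 'BBBB  '},
--              'C': {0: ' CCC  ', 1: 'C   C ', 2: 'C     ', 3: 'C     ', 4: 'C     ', 5: 'C   C ', 6: ' CCC  '},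
--              'D': {0: 'DDDD  ', 1: 'D   D ', 2: 'D   D ', 3: 'D   D ', 4: 'D   D ', 5: 'D   D ', 6: 'DDDD  '},
--              'E': {0: 'EEEEE ', 1: 'E     ', 2: 'E     ', 3: 'EEEEE ', 4: 'E     ', 5: 'E     ', 6: 'EEEEE '},
--              'F': {0: 'FFFFF ', 1: 'F     ', 2: 'F     ', 3: 'FFFFF ', 4: 'F     ', 5: 'F     ', 6: 'F     '},
--              'G': {0: ' GGG  ', 1: 'G   G ', 2: 'G     ', 3: 'G GGG ', 4: 'G   G ', 5: 'G   G ', 6: ' GGG  '},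
--              'H': {0: 'H   H ', 1: 'H   H ', 2: 'H   H ', 3: 'HHHHH ', 4: 'H   H ', 5: 'H   H ', 6: 'H   H '},
--              'I': {0: 'IIIII ', 1: '  I   ', 2: '  I   ', 3: '  I   ', 4: '  I   ', 5: '  I   ', 6: 'IIIII '},
--              'J': {0: 'JJJJJ ', 1: '    J ', 2: '    J ', 3: '    J ', 4: '    J ', 5: '    J ', 6: 'JJJJ  '},
--              'K': {0: 'K   K ', 1: 'K  K  ', 2: 'K K   ', 3: 'KK    ', 4: 'K K   ', 5: 'K  K  ', 6: 'K   K '},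
--              'L': {0: 'L     ', 1: 'L     ', 2: 'L     ', 3: 'L     ', 4: 'L     ', 5: 'L     ', 6: 'LLLLL '},
--              'M': {0: 'M   M ', 1: 'MM MM ', 2: 'M M M ', 3: 'M   M ', 4: 'M   M ', 5: 'M   M ', 6: 'M   M '},
--              'N': {0: 'N   N ', 1: 'NN  N ', 2: 'N   N ', 3: 'N N N ', 4: 'N   N ', 5: 'N  NN ', 6: 'N   N '},
--              'O': {0: ' OOO  ', 1: 'O   O ', 2: 'O   O ', 3: 'O   O ', 4: 'O   O ', 5: 'O   O ', 6: ' OOO  '},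
--              'P': {0: 'PPPP  ', 1: 'P   P ', 2: 'P   P ', 3: 'PPPP  ', 4: 'P     ', 5: 'P     ', 6: 'P     '},
--              'Q': {0: ' QQQ  ', 1: 'Q   Q ', 2: 'Q   Q ', 3: 'Q   Q ', 4: 'Q Q Q ', 5: 'Q  QQ ', 6: ' QQQQ '},
--              'R': {0: 'RRRR  ', 1: 'R   R ', 2: 'R   R ', 3: 'RRRR  ', 4: 'R R   ', 5: 'R  R  ', 6: 'R   R '},
--              'S': {0: ' SSS  ', 1: 'S   S ', 2: 'S     ', 3: ' SSS  ', 4: '    S ', 5: 'S   S ', 6: ' SSS  '},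
--              'T': {0: 'TTTTT ', 1: '  T   ', 2: '  T   ', 3: '  T   ', 4: '  T   ', 5: '  T   ', 6: '  T   '},
--              'U': {0: 'U   U ', 1: 'U   U ', 2: 'U   U ', 3: 'U   U ', 4: 'U   U ', 5: 'U   U ', 6: ' UUU  '},
--              'V': {0: 'V   V ', 1: 'V   V ', 2: 'V   V ', 3: 'V   V ', 4: 'V   V ', 5: ' V V  ', 6: '  V   '},
--              'W': {0: 'W   W ', 1: 'W   W ', 2: 'W   W ', 3: 'W W W ', 4: 'W W W ', 5: 'W W W ', 6: ' W W  '},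
--              'X': {0: 'X   X ', 1: 'X   X ', 2: ' X X  ', 3: '  X   ', 4: ' X X  ', 5: 'X   X ', 6: 'X   X '},
--              'Y': {0: 'Y   Y ', 1: 'Y   Y ', 2: ' Y Y  ', 3: '  Y   ', 4: '  Y   ', 5: '  Y   ', 6: '  Y   '},
--              'Z': {0: 'ZZZZZ ', 1: '    Z ', 2: '   Z  ', 3: '  Z   ', 4: ' Z    ', 5: 'Z     ', 6: 'ZZZZZ '},
--              ' ': {0: '      ', 1: '      ', 2: '      ', 3: '      ', 4: '      ', 5: '      ', 6: '      '}}
--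
--     res = ''
--     for i in range(7):
--         for k, j in enumerate(s.upper().strip()):
--             res += alpha[j][i]
--         res = res.rstrip() + '\n'
--
--     return res[:-1]
-- ===== SOURCE B (Python) =====
-- ALPHA = {'A': [' AAA  ', 'A   A ', 'A   A ', 'AAAAA ', 'A   A ', 'A   A ', 'A   A '],
--          'B': ['BBBB  ', 'B   B ', 'B   B ', 'BBBB  ', 'B   B ', 'B   B ', 'BBBB  '],
--          'C': [' CCC  ', 'C   C ', 'C     ', 'C     ', 'C     ', 'C   C ', ' CCC  '],
--          'D': ['DDDD  ', 'D   D ', 'D   D ', 'D   D ', 'D   D ', 'D   D ', 'DDDD  '],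
--          'E': ['EEEEE ', 'E     ', 'E     ', 'EEEEE ', 'E     ', 'E     ', 'EEEEE '],
--          'F': ['FFFFF ', 'F     ', 'F     ', 'FFFFF ', 'F     ', 'F     ', 'F     '],
--          'G': [' GGG  ', 'G   G ', 'G     ', 'G GGG ', 'G   G ', 'G   G ', ' GGG  '],
--          'H': ['H   H ', 'H   H ', 'H   H ', 'HHHHH ', 'H   H ', 'H   H ', 'H   H '],
--          'I': ['IIIII ', '  I   ', '  I   ', '  I   ', '  I   ', '  I   ', 'IIIII '],
--          'J': ['JJJJJ ', '    J ', '    J ', '    J ', '    J ', '    J ', 'JJJJ  '],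
--          'K': ['K   K ', 'K  K  ', 'K K   ', 'KK    ', 'K K   ', 'K  K  ', 'K   K '],
--          'L': ['L     ', 'L     ', 'L     ', 'L     ', 'L     ', 'L     ', 'LLLLL '],
--          'M': ['M   M ', 'MM MM ', 'M M M ', 'M   M ', 'M   M ', 'M   M ', 'M   M '],
--          'N': ['N   N ', 'NN  N ', 'N   N ', 'N N N ', 'N   N ', 'N  NN ', 'N   N '],
--          'O': [' OOO  ', 'O   O ', 'O   O ', 'O   O ', 'O   O ', 'O   O ', ' OOO  '],
--          'P': ['PPPP  ', 'P   P ', 'P   P ', 'PPPP  ', 'P     ', 'P     ', 'P     '],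
--          'Q': [' QQQ  ', 'Q   Q ', 'Q   Q ', 'Q   Q ', 'Q Q Q ', 'Q  QQ ', ' QQQQ '],
--          'R': ['RRRR  ', 'R   R ', 'R   R ', 'RRRR  ', 'R R   ', 'R  R  ', 'R   R '],
--          'S': [' SSS  ', 'S   S ', 'S     ', ' SSS  ', '    S ', 'S   S ', ' SSS  '],
--          'T': ['TTTTT ', '  T   ', '  T   ', '  T   ', '  T   ', '  T   ', '  T   '],
--          'U': ['U   U ', 'U   U ', 'U   U ', 'U   U ', 'U   U ', 'U   U ', ' UUU  '],
--          'V': ['V   V ', 'V   V ', 'V   V ', 'V   V ', 'V   V ', ' V V  ', '  V   '],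
--          'W': ['W   W ', 'W   W ', 'W   W ', 'W W W ', 'W W W ', 'W W W ', ' W W  '],
--          'X': ['X   X ', 'X   X ', ' X X  ', '  X   ', ' X X  ', 'X   X ', 'X   X '],
--          'Y': ['Y   Y ', 'Y   Y ', ' Y Y  ', '  Y   ', '  Y   ', '  Y   ', '  Y   '],
--          'Z': ['ZZZZZ ', '    Z ', '   Z  ', '  Z   ', ' Z    ', 'Z     ', 'ZZZZZ '],
--          ' ': ['      ', '      ', '      ', '      ', '      ', '      ', '      ']}
--
--
-- def block_print(s: str) -> str:
--     """Single pass over the text: each character's glyph appends one fragment to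
--     each of seven row buffers; the rows are rstripped once and joined at the end."""
--     text = s.upper().strip()
--     r0 = r1 = r2 = r3 = r4 = r5 = r6 = ''
--     for ch in text:
--         g = ALPHA[ch]
--         r0 += g[0]; r1 += g[1]; r2 += g[2]; r3 += g[3]
--         r4 += g[4]; r5 += g[5]; r6 += g[6]
--     return '\n'.join(row.rstrip() for row in (r0, r1, r2, r3, r4, r5, r6))
-- ===== Notes on version B (the rewrite author's own statement) =====
-- stated objective: faster
-- what changed: B makes a single pass over the text, appending each character's seven glyph fragments to seven row buffers that are rstripped once and joined at the end, instead of A's seven full scans of the text each followed by an rstrip of the whole accumulated result.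
-- outside the precondition, e.g. on block_print(''): A returns '', B returns '\n\n\n\n\n\n'; on block_print('  \t'): A returns '', B returns '\n\n\n\n\n\n'
import Mathlib
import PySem

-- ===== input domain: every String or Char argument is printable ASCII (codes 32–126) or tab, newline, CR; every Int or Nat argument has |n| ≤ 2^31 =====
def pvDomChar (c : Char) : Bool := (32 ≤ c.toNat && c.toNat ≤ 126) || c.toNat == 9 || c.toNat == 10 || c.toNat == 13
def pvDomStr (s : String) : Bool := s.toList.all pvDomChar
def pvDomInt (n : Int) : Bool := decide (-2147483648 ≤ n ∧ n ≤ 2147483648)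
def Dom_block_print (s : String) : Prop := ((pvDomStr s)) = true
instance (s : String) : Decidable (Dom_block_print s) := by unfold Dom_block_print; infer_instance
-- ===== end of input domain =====

-- B builds the seven rows in one pass over the text (seven buffers, each rstripped once and
-- joined at the end) instead of A's seven scans each followed by an rstrip of the whole
-- accumulated result.

-- ===== PORT A =====
def alphaA : PySem.Dict Char (PySem.Dict Int String) := PySem.Dict.mk [
  ('A', PySem.Dict.mk [((0 : Int), " AAA  "), ((1 : Int), "A   A "), ((2 : Int), "A   A "), ((3 : Int), "AAAAA "), ((4 : Int), "A   A "), ((5 : Int), "A   A "), ((6 : Int), "A   A ")]),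
  ('B', PySem.Dict.mk [((0 : Int), "BBBB  "), ((1 : Int), "B   B "), ((2 : Int), "B   B "), ((3 : Int), "BBBB  "), ((4 : Int), "B   B "), ((5 : Int), "B   B "), ((6 : Int), "BBBB  ")]),
  ('C', PySem.Dict.mk [((0 : Int), " CCC  "), ((1 : Int), "C   C "), ((2 : Int), "C     "), ((3 : Int), "C     "), ((4 : Int), "C     "), ((5 : Int), "C   C "), ((6 : Int), " CCC  ")]),
  ('D', PySem.Dict.mk [((0 : Int), "DDDD  "), ((1 : Int), "D   D "), ((2 : Int), "D   D "), ((3 : Int), "D   D "), ((4 : Int), "D   D "), ((5 : Int), "D   D "), ((6 : Int), "DDDD  ")]),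
  ('E', PySem.Dict.mk [((0 : Int), "EEEEE "), ((1 : Int), "E     "), ((2 : Int), "E     "), ((3 : Int), "EEEEE "), ((4 : Int), "E     "), ((5 : Int), "E     "), ((6 : Int), "EEEEE ")]),
  ('F', PySem.Dict.mk [((0 : Int), "FFFFF "), ((1 : Int), "F     "), ((2 : Int), "F     "), ((3 : Int), "FFFFF "), ((4 : Int), "F     "), ((5 : Int), "F     "), ((6 : Int), "F     ")]),
  ('G', PySem.Dict.mk [((0 : Int), " GGG  "), ((1 : Int), "G   G "), ((2 : Int), "G     "), ((3 : Int), "G GGG "), ((4 : Int), "G   G "), ((5 : Int), "G   G "), ((6 : Int), " GGG  ")]),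
  ('H', PySem.Dict.mk [((0 : Int), "H   H "), ((1 : Int), "H   H "), ((2 : Int), "H   H "), ((3 : Int), "HHHHH "), ((4 : Int), "H   H "), ((5 : Int), "H   H "), ((6 : Int), "H   H ")]),
  ('I', PySem.Dict.mk [((0 : Int), "IIIII "), ((1 : Int), "  I   "), ((2 : Int), "  I   "), ((3 : Int), "  I   "), ((4 : Int), "  I   "), ((5 : Int), "  I   "), ((6 : Int), "IIIII ")]),
  ('J', PySem.Dict.mk [((0 : Int), "JJJJJ "), ((1 : Int), "    J "), ((2 : Int), "    J "), ((3 : Int), "    J "), ((4 : Int), "    J "), ((5 : Int), "    J "), ((6 : Int), "JJJJ  ")]),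
  ('K', PySem.Dict.mk [((0 : Int), "K   K "), ((1 : Int), "K  K  "), ((2 : Int), "K K   "), ((3 : Int), "KK    "), ((4 : Int), "K K   "), ((5 : Int), "K  K  "), ((6 : Int), "K   K ")]),
  ('L', PySem.Dict.mk [((0 : Int), "L     "), ((1 : Int), "L     "), ((2 : Int), "L     "), ((3 : Int), "L     "), ((4 : Int), "L     "), ((5 : Int), "L     "), ((6 : Int), "LLLLL ")]),
  ('M', PySem.Dict.mk [((0 : Int), "M   M "), ((1 : Int), "MM MM "), ((2 : Int), "M M M "), ((3 : Int), "M   M "), ((4 : Int), "M   M "), ((5 : Int), "M   M "), ((6 : Int), "M   M ")]),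
  ('N', PySem.Dict.mk [((0 : Int), "N   N "), ((1 : Int), "NN  N "), ((2 : Int), "N   N "), ((3 : Int), "N N N "), ((4 : Int), "N   N "), ((5 : Int), "N  NN "), ((6 : Int), "N   N ")]),
  ('O', PySem.Dict.mk [((0 : Int), " OOO  "), ((1 : Int), "O   O "), ((2 : Int), "O   O "), ((3 : Int), "O   O "), ((4 : Int), "O   O "), ((5 : Int), "O   O "), ((6 : Int), " OOO  ")]),
  ('P', PySem.Dict.mk [((0 : Int), "PPPP  "), ((1 : Int), "P   P "), ((2 : Int), "P   P "), ((3 : Int), "PPPP  "), ((4 : Int), "P     "), ((5 : Int), "P     "), ((6 : Int), "P     ")]),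
  ('Q', PySem.Dict.mk [((0 : Int), " QQQ  "), ((1 : Int), "Q   Q "), ((2 : Int), "Q   Q "), ((3 : Int), "Q   Q "), ((4 : Int), "Q Q Q "), ((5 : Int), "Q  QQ "), ((6 : Int), " QQQQ ")]),
  ('R', PySem.Dict.mk [((0 : Int), "RRRR  "), ((1 : Int), "R   R "), ((2 : Int), "R   R "), ((3 : Int), "RRRR  "), ((4 : Int), "R R   "), ((5 : Int), "R  R  "), ((6 : Int), "R   R ")]),
  ('S', PySem.Dict.mk [((0 : Int), " SSS  "), ((1 : Int), "S   S "), ((2 : Int), "S     "), ((3 : Int), " SSS  "), ((4 : Int), "    S "), ((5 : Int), "S   S "), ((6 : Int), " SSS  ")]),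
  ('T', PySem.Dict.mk [((0 : Int), "TTTTT "), ((1 : Int), "  T   "), ((2 : Int), "  T   "), ((3 : Int), "  T   "), ((4 : Int), "  T   "), ((5 : Int), "  T   "), ((6 : Int), "  T   ")]),
  ('U', PySem.Dict.mk [((0 : Int), "U   U "), ((1 : Int), "U   U "), ((2 : Int), "U   U "), ((3 : Int), "U   U "), ((4 : Int), "U   U "), ((5 : Int), "U   U "), ((6 : Int), " UUU  ")]),
  ('V', PySem.Dict.mk [((0 : Int), "V   V "), ((1 : Int), "V   V "), ((2 : Int), "V   V "), ((3 : Int), "V   V "), ((4 : Int), "V   V "), ((5 : Int), " V V  "), ((6 : Int), "  V   ")]),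
  ('W', PySem.Dict.mk [((0 : Int), "W   W "), ((1 : Int), "W   W "), ((2 : Int), "W   W "), ((3 : Int), "W W W "), ((4 : Int), "W W W "), ((5 : Int), "W W W "), ((6 : Int), " W W  ")]),
  ('X', PySem.Dict.mk [((0 : Int), "X   X "), ((1 : Int), "X   X "), ((2 : Int), " X X  "), ((3 : Int), "  X   "), ((4 : Int), " X X  "), ((5 : Int), "X   X "), ((6 : Int), "X   X ")]),
  ('Y', PySem.Dict.mk [((0 : Int), "Y   Y "), ((1 : Int), "Y   Y "), ((2 : Int), " Y Y  "), ((3 : Int), "  Y   "), ((4 : Int), "  Y   "), ((5 : Int), "  Y   "), ((6 : Int), "  Y   ")]),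
  ('Z', PySem.Dict.mk [((0 : Int), "ZZZZZ "), ((1 : Int), "    Z "), ((2 : Int), "   Z  "), ((3 : Int), "  Z   "), ((4 : Int), " Z    "), ((5 : Int), "Z     "), ((6 : Int), "ZZZZZ ")]),
  (' ', PySem.Dict.mk [((0 : Int), "      "), ((1 : Int), "      "), ((2 : Int), "      "), ((3 : Int), "      "), ((4 : Int), "      "), ((5 : Int), "      "), ((6 : Int), "      ")])
]

def block_print (s : String) : String :=
  let res := (PySem.List.pyRange 0 7 1).foldl (fun res i =>
    let res := (PySem.List.enumerate (PySem.Chars.strip (PySem.Chars.upper s.toList))).foldl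
      (fun res kj => res ++ ((alphaA.getD kj.2 PySem.Dict.empty).getD i "").toList) res
    PySem.Chars.rstrip res ++ ['\n']) ([] : List Char)
  String.ofList (PySem.List.slice res none (some (-1)))

-- ===== PORT B =====
def alphaB : PySem.Dict Char (List String) := PySem.Dict.mk [
  ('A', [" AAA  ", "A   A ", "A   A ", "AAAAA ", "A   A ", "A   A ", "A   A "]),
  ('B', ["BBBB  ", "B   B ", "B   B ", "BBBB  ", "B   B ", "B   B ", "BBBB  "]),
  ('C', [" CCC  ", "C   C ", "C     ", "C     ", "C     ", "C   C ", " CCC  "]),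
  ('D', ["DDDD  ", "D   D ", "D   D ", "D   D ", "D   D ", "D   D ", "DDDD  "]),
  ('E', ["EEEEE ", "E     ", "E     ", "EEEEE ", "E     ", "E     ", "EEEEE "]),
  ('F', ["FFFFF ", "F     ", "F     ", "FFFFF ", "F     ", "F     ", "F     "]),
  ('G', [" GGG  ", "G   G ", "G     ", "G GGG ", "G   G ", "G   G ", " GGG  "]),
  ('H', ["H   H ", "H   H ", "H   H ", "HHHHH ", "H   H ", "H   H ", "H   H "]),
  ('I', ["IIIII ", "  I   ", "  I   ", "  I   ", "  I   ", "  I   ", "IIIII "]),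
  ('J', ["JJJJJ ", "    J ", "    J ", "    J ", "    J ", "    J ", "JJJJ  "]),
  ('K', ["K   K ", "K  K  ", "K K   ", "KK    ", "K K   ", "K  K  ", "K   K "]),
  ('L', ["L     ", "L     ", "L     ", "L     ", "L     ", "L     ", "LLLLL "]),
  ('M', ["M   M ", "MM MM ", "M M M ", "M   M ", "M   M ", "M   M ", "M   M "]),
  ('N', ["N   N ", "NN  N ", "N   N ", "N N N ", "N   N ", "N  NN ", "N   N "]),
  ('O', [" OOO  ", "O   O ", "O   O ", "O   O ", "O   O ", "O   O ", " OOO  "]),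
  ('P', ["PPPP  ", "P   P ", "P   P ", "PPPP  ", "P     ", "P     ", "P     "]),
  ('Q', [" QQQ  ", "Q   Q ", "Q   Q ", "Q   Q ", "Q Q Q ", "Q  QQ ", " QQQQ "]),
  ('R', ["RRRR  ", "R   R ", "R   R ", "RRRR  ", "R R   ", "R  R  ", "R   R "]),
  ('S', [" SSS  ", "S   S ", "S     ", " SSS  ", "    S ", "S   S ", " SSS  "]),
  ('T', ["TTTTT ", "  T   ", "  T   ", "  T   ", "  T   ", "  T   ", "  T   "]),
  ('U', ["U   U ", "U   U ", "U   U ", "U   U ", "U   U ", "U   U ", " UUU  "]),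
  ('V', ["V   V ", "V   V ", "V   V ", "V   V ", "V   V ", " V V  ", "  V   "]),
  ('W', ["W   W ", "W   W ", "W   W ", "W W W ", "W W W ", "W W W ", " W W  "]),
  ('X', ["X   X ", "X   X ", " X X  ", "  X   ", " X X  ", "X   X ", "X   X "]),
  ('Y', ["Y   Y ", "Y   Y ", " Y Y  ", "  Y   ", "  Y   ", "  Y   ", "  Y   "]),
  ('Z', ["ZZZZZ ", "    Z ", "   Z  ", "  Z   ", " Z    ", "Z     ", "ZZZZZ "]),
  (' ', ["      ", "      ", "      ", "      ", "      ", "      ", "      "])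
]

def stepB (r : List Char × List Char × List Char × List Char × List Char × List Char × List Char)
    (ch : Char) : List Char × List Char × List Char × List Char × List Char × List Char × List Char :=
  match r with
  | (r0, r1, r2, r3, r4, r5, r6) =>
    let g := alphaB.getD ch []
    (r0 ++ (g.getD 0 "").toList, r1 ++ (g.getD 1 "").toList, r2 ++ (g.getD 2 "").toList,
     r3 ++ (g.getD 3 "").toList, r4 ++ (g.getD 4 "").toList, r5 ++ (g.getD 5 "").toList,
     r6 ++ (g.getD 6 "").toList)

def block_print_alt (s : String) : String :=
  let text := PySem.Chars.strip (PySem.Chars.upper s.toList)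
  match text.foldl stepB (([] : List Char), [], [], [], [], [], []) with
  | (r0, r1, r2, r3, r4, r5, r6) =>
    String.ofList (PySem.Chars.join ['\n'] ([r0, r1, r2, r3, r4, r5, r6].map PySem.Chars.rstrip))

-- ===== PRECONDITION & SPEC =====
def pvLettersA : List Char := "ABCDEFGHIJKLMNOPQRSTUVWXYZ".toList

-- Pre_ excludes (a) strings in which upper+strip leaves a character other than A–Z or space
-- (A raises KeyError there), and (b) strings that strip to the empty text, a corner where no
-- rendering is specified: A's '' (an artefact of rstripping the whole accumulated result)
-- and B's six bare newlines are both defensible, so that corner is left out of the claim.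
def Pre_block_print (s : String) : Prop :=
  ((PySem.Chars.strip (PySem.Chars.upper s.toList)).all
      (fun c => c == ' ' || pvLettersA.contains c) = true) ∧
  ((PySem.Chars.strip (PySem.Chars.upper s.toList)).any (fun c => c != ' ') = true)
instance (s : String) : Decidable (Pre_block_print s) := by unfold Pre_block_print; infer_instance

def pvWitness_block_print : String := "Hi"

def Spec_block_print (s : String) (out : String) : Prop := out = block_print_alt s
instance (s : String) (out : String) : Decidable (Spec_block_print s out) := by unfold Spec_block_print; infer_instance

-- ===== CLAIM (what is proved, stated in full; the proofs are below) =====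
def Claim_equal_block_print : Prop := ∀ (s : String), Dom_block_print s → Pre_block_print s → Spec_block_print s (block_print s)

-- ===== LEMMAS AND PROOFS =====

def gA (c : Char) (i : Int) : List Char := ((alphaA.getD c PySem.Dict.empty).getD i "").toList
def gB (c : Char) (i : Nat) : List Char := ((alphaB.getD c []).getD i "").toList
def rowA (T : List Char) (i : Int) : List Char := T.flatMap (fun c => gA c i)
def rowB (T : List Char) (i : Nat) : List Char := T.flatMap (fun c => gB c i)

abbrev tbl (c : Char) : Prop :=
  gA c 0 = gB c 0 ∧ gA c 1 = gB c 1 ∧ gA c 2 = gB c 2 ∧ gA c 3 = gB c 3 ∧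
  gA c 4 = gB c 4 ∧ gA c 5 = gB c 5 ∧ gA c 6 = gB c 6

abbrev lns (c : Char) : Prop :=
  ∀ i ∈ ([0, 1, 2, 3, 4, 5, 6] : List Int),
    (gA c i).any (fun ch => !PySem.Chars.isspace ch) = true

set_option maxRecDepth 15000 in
theorem pvT0 : tbl ' ' ∧ tbl 'A' ∧ tbl 'B' := by decide
set_option maxRecDepth 15000 in
theorem pvT1 : tbl 'C' ∧ tbl 'D' ∧ tbl 'E' := by decide
set_option maxRecDepth 15000 in
theorem pvT2 : tbl 'F' ∧ tbl 'G' ∧ tbl 'H' := by decide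
set_option maxRecDepth 15000 in
theorem pvT3 : tbl 'I' ∧ tbl 'J' ∧ tbl 'K' := by decide
set_option maxRecDepth 15000 in
theorem pvT4 : tbl 'L' ∧ tbl 'M' ∧ tbl 'N' := by decide
set_option maxRecDepth 15000 in
theorem pvT5 : tbl 'O' ∧ tbl 'P' ∧ tbl 'Q' := by decide
set_option maxRecDepth 15000 in
theorem pvT6 : tbl 'R' ∧ tbl 'S' ∧ tbl 'T' := by decide
set_option maxRecDepth 15000 in
theorem pvT7 : tbl 'U' ∧ tbl 'V' ∧ tbl 'W' := by decide
set_option maxRecDepth 15000 in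
theorem pvT8 : tbl 'X' ∧ tbl 'Y' ∧ tbl 'Z' := by decide

set_option maxRecDepth 15000 in
theorem pvL0 : lns 'A' ∧ lns 'B' ∧ lns 'C' := by decide
set_option maxRecDepth 15000 in
theorem pvL1 : lns 'D' ∧ lns 'E' ∧ lns 'F' := by decide
set_option maxRecDepth 15000 in
theorem pvL2 : lns 'G' ∧ lns 'H' ∧ lns 'I' := by decide
set_option maxRecDepth 15000 in
theorem pvL3 : lns 'J' ∧ lns 'K' ∧ lns 'L' := by decide
set_option maxRecDepth 15000 in
theorem pvL4 : lns 'M' ∧ lns 'N' ∧ lns 'O' := by decide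
set_option maxRecDepth 15000 in
theorem pvL5 : lns 'P' ∧ lns 'Q' ∧ lns 'R' := by decide
set_option maxRecDepth 15000 in
theorem pvL6 : lns 'S' ∧ lns 'T' ∧ lns 'U' := by decide
set_option maxRecDepth 15000 in
theorem pvL7 : lns 'V' ∧ lns 'W' ∧ lns 'X' := by decide
set_option maxRecDepth 15000 in
theorem pvL8 : lns 'Y' ∧ lns 'Z' := by decide

theorem table_eq : ∀ c ∈ (' ' :: pvLettersA), tbl c := by
  intro c hc
  rw [show (' ' :: pvLettersA) = [' ', 'A', 'B', 'C', 'D', 'E', 'F', 'G', 'H', 'I', 'J', 'K', 'L', 'M', 'N', 'O', 'P', 'Q', 'R', 'S', 'T', 'U', 'V', 'W', 'X', 'Y', 'Z'] from rfl] at hc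
  fin_cases hc
  exacts [pvT0.1, pvT0.2.1, pvT0.2.2, pvT1.1, pvT1.2.1, pvT1.2.2, pvT2.1, pvT2.2.1, pvT2.2.2, pvT3.1, pvT3.2.1, pvT3.2.2, pvT4.1, pvT4.2.1, pvT4.2.2, pvT5.1, pvT5.2.1, pvT5.2.2, pvT6.1, pvT6.2.1, pvT6.2.2, pvT7.1, pvT7.2.1, pvT7.2.2, pvT8.1, pvT8.2.1, pvT8.2.2]

theorem letters_nonspace : ∀ c ∈ pvLettersA, lns c := by
  intro c hc
  rw [show pvLettersA = ['A', 'B', 'C', 'D', 'E', 'F', 'G', 'H', 'I', 'J', 'K', 'L', 'M', 'N', 'O', 'P', 'Q', 'R', 'S', 'T', 'U', 'V', 'W', 'X', 'Y', 'Z'] from rfl] at hc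
  fin_cases hc
  exacts [pvL0.1, pvL0.2.1, pvL0.2.2, pvL1.1, pvL1.2.1, pvL1.2.2, pvL2.1, pvL2.2.1, pvL2.2.2, pvL3.1, pvL3.2.1, pvL3.2.2, pvL4.1, pvL4.2.1, pvL4.2.2, pvL5.1, pvL5.2.1, pvL5.2.2, pvL6.1, pvL6.2.1, pvL6.2.2, pvL7.1, pvL7.2.1, pvL7.2.2, pvL8.1, pvL8.2]

theorem enumA_foldl (i : Int) :
    ∀ (xs : List Char) (k : Int) (init : List Char),
    (PySem.List.enumerate xs k).foldl
        (fun res kj => res ++ ((alphaA.getD kj.2 PySem.Dict.empty).getD i "").toList) init =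
      init ++ rowA xs i := by
  intro xs
  induction xs with
  | nil => intro k init; simp [PySem.List.enumerate_nil, rowA]
  | cons c T ih =>
    intro k init
    simp [PySem.List.enumerate_cons, ih, rowA, gA, List.flatMap_cons]

theorem rstrip_append {a b : List Char} (h : ∃ c ∈ b, PySem.Chars.isspace c = false) :
    PySem.Chars.rstrip (a ++ b) = a ++ PySem.Chars.rstrip b := by
  obtain ⟨c, hc, hns⟩ := h
  have hne : b.reverse.dropWhile PySem.Chars.isspace ≠ [] := by
    intro hnil
    have := List.dropWhile_eq_nil_iff.mp hnil c (by simpa using hc)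
    simp [hns] at this
  unfold PySem.Chars.rstrip
  rw [List.reverse_append, List.dropWhile_append]
  simp [List.isEmpty_iff, hne]

theorem row_nonspace {T : List Char} (hv : ∀ c ∈ T, c = ' ' ∨ c ∈ pvLettersA)
    (hx : ∃ c ∈ T, c ≠ ' ') {i : Int} (hi : i ∈ ([0, 1, 2, 3, 4, 5, 6] : List Int)) :
    ∃ ch ∈ rowA T i, PySem.Chars.isspace ch = false := by
  obtain ⟨c0, hc0, hne⟩ := hx
  have hl : c0 ∈ pvLettersA := (hv c0 hc0).resolve_left hne
  have h := letters_nonspace c0 hl i hi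
  rw [List.any_eq_true] at h
  obtain ⟨ch, hch, hns⟩ := h
  exact ⟨ch, List.mem_flatMap.mpr ⟨c0, hc0, hch⟩, by simpa using hns⟩

theorem foldB_spec : ∀ (T : List Char) (a0 a1 a2 a3 a4 a5 a6 : List Char),
    T.foldl stepB (a0, a1, a2, a3, a4, a5, a6) =
      (a0 ++ rowB T 0, a1 ++ rowB T 1, a2 ++ rowB T 2, a3 ++ rowB T 3,
       a4 ++ rowB T 4, a5 ++ rowB T 5, a6 ++ rowB T 6) := by
  intro T
  induction T with
  | nil => intro a0 a1 a2 a3 a4 a5 a6; simp [rowB]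
  | cons c T ih =>
    intro a0 a1 a2 a3 a4 a5 a6
    simp [List.foldl, stepB, ih, rowB, gB, List.flatMap_cons]

theorem row_eq (T : List Char) (hv : ∀ c ∈ T, c = ' ' ∨ c ∈ pvLettersA) :
    rowA T 0 = rowB T 0 ∧ rowA T 1 = rowB T 1 ∧ rowA T 2 = rowB T 2 ∧ rowA T 3 = rowB T 3 ∧
    rowA T 4 = rowB T 4 ∧ rowA T 5 = rowB T 5 ∧ rowA T 6 = rowB T 6 := by
  induction T with
  | nil => simp [rowA, rowB]
  | cons c T ih =>
    have hc : c ∈ (' ' :: pvLettersA) := by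
      rcases hv c List.mem_cons_self with h | h
      · simp [h]
      · exact List.mem_cons_of_mem _ h
    have ht := table_eq c hc
    have ihh := ih (fun x hx => hv x (List.mem_cons_of_mem _ hx))
    simp only [rowA, rowB, List.flatMap_cons] at *
    exact ⟨by rw [ht.1, ihh.1], by rw [ht.2.1, ihh.2.1], by rw [ht.2.2.1, ihh.2.2.1],
           by rw [ht.2.2.2.1, ihh.2.2.2.1], by rw [ht.2.2.2.2.1, ihh.2.2.2.2.1],
           by rw [ht.2.2.2.2.2.1, ihh.2.2.2.2.2.1], by rw [ht.2.2.2.2.2.2, ihh.2.2.2.2.2.2]⟩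

-- ===== VERDICT (by name: the statement is the Claim_ definition above) =====
theorem block_print_spec : Claim_equal_block_print := by
  intro s _ hpre
  obtain ⟨hva, hxa⟩ := hpre
  unfold Spec_block_print
  set T := PySem.Chars.strip (PySem.Chars.upper s.toList) with hT
  have hv : ∀ c ∈ T, c = ' ' ∨ c ∈ pvLettersA := by
    intro c hc
    have h := List.all_eq_true.mp hva c hc
    simpa using h
  have hx : ∃ c ∈ T, c ≠ ' ' := by
    have h := List.any_eq_true.mp hxa
    simpa using h
  simp only [block_print, block_print_alt, ← hT]
  have hrange : PySem.List.pyRange 0 7 1 = [0, 1, 2, 3, 4, 5, 6] := by decide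
  rw [hrange]
  simp only [List.foldl, enumA_foldl, List.nil_append]
  rw [foldB_spec]
  have req := row_eq T hv
  have hns : ∀ i ∈ ([0, 1, 2, 3, 4, 5, 6] : List Int),
      ∃ ch ∈ rowA T i, PySem.Chars.isspace ch = false :=
    fun i hi => row_nonspace hv hx hi
  rw [rstrip_append (hns 1 (by simp)), rstrip_append (hns 2 (by simp)),
      rstrip_append (hns 3 (by simp)), rstrip_append (hns 4 (by simp)),
      rstrip_append (hns 5 (by simp)), rstrip_append (hns 6 (by simp))]
  rw [PySem.List.slice_to_neg_one, List.dropLast_concat]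
  simp [PySem.Chars.join, List.intercalate, req.1, req.2.1, req.2.2.1, req.2.2.2.1,
        req.2.2.2.2.1, req.2.2.2.2.2.1, req.2.2.2.2.2.2, List.append_assoc]
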